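-- pv_equiv track=rewrite | github.com/Futurecontingents/recursive-rebels-deploy | Web_srapers_etl_pipe/scraper/propertyfinder/parser.py | parse_location_tree
-- ===== SOURCE A (Python) =====
-- from typing import Any, Optional
--
-- def parse_location_tree(location_tree: list[dict[str, Any]]) -> dict[str, str]:
--     location_parts = {
--         "city": "",
--         "community": "",
--         "subcommunity": "",
--         "building": "",
--     }
--
--     for node in location_tree or []:
--         node_type = (node.get("type") or "").upper()
--         name = node.get("name") or ""
--         if node_type == "CITY" and not location_parts["city"]:
--             location_parts["city"] = name
--         elif node_type == "COMMUNITY" and not location_parts["community"]: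
--             location_parts["community"] = name
--         elif node_type == "SUBCOMMUNITY" and not location_parts["subcommunity"]:
--             location_parts["subcommunity"] = name
--         elif node_type in {"TOWER", "BUILDING", "COMPOUND", "VILLA"} and not location_parts["building"]:
--             location_parts["building"] = name
--
--     if not location_parts["building"] and location_tree:
--         location_parts["building"] = location_tree[-1].get("name") or ""
--
--     return location_parts
-- ===== SOURCE B (Python) =====
-- def parse_location_tree(location_tree):
--     nodes = location_tree or []
--
--     def first(pred):
--         return next(
--             (name for n in nodes
--              if pred((n.get("type") or "").upper()) and (name := n.get("name") or "")),
--             "",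
--         )
--
--     building = first(lambda t: t in {"TOWER", "BUILDING", "COMPOUND", "VILLA"})
--     if not building and location_tree:
--         building = location_tree[-1].get("name") or ""
--
--     return {
--         "city": first(lambda t: t == "CITY"),
--         "community": first(lambda t: t == "COMMUNITY"),
--         "subcommunity": first(lambda t: t == "SUBCOMMUNITY"),
--         "building": building,
--     }
-- ===== Notes on version B (the rewrite author's own statement) =====
-- stated objective: alternative
-- what changed: Replaces A's single stateful accumulator loop (mutable dict with first-non-empty-name slot locking) by four independent first-match scans with next() over the node list, plus the unchanged last-node fallback for building.
import Mathlib
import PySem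

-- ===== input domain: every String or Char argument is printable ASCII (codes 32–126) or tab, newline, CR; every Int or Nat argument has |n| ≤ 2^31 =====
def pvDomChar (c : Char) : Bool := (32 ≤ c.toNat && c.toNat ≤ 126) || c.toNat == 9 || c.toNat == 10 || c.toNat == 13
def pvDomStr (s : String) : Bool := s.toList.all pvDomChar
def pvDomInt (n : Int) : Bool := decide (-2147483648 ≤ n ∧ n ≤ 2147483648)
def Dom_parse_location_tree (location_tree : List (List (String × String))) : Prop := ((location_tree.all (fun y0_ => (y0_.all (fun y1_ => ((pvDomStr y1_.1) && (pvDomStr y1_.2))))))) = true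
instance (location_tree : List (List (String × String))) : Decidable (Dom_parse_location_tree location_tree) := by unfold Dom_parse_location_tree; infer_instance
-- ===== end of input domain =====

-- B replaces A's single stateful accumulator loop by four independent first-match scans (objective: alternative).

-- ===== PORT A =====
-- node.get(k) or "" : first match in the association list, None/missing -> ""
def pvGetOr (node : List (String × String)) (k : String) : String :=
  ((PySem.Dict.mk node).get? k).getD ""

-- one iteration of A's for-loop over (city, community, subcommunity, building)
def pvStepA (p : String × String × String × String) (node : List (String × String)) :
    String × String × String × String :=
  let c := p.1; let m := p.2.1; let s := p.2.2.1; let b := p.2.2.2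
  let t := PySem.Str.upper (pvGetOr node "type")
  let name := pvGetOr node "name"
  if t = "CITY" ∧ c = "" then (name, m, s, b)
  else if t = "COMMUNITY" ∧ m = "" then (c, name, s, b)
  else if t = "SUBCOMMUNITY" ∧ s = "" then (c, m, name, b)
  else if (t = "TOWER" ∨ t = "BUILDING" ∨ t = "COMPOUND" ∨ t = "VILLA") ∧ b = "" then (c, m, s, name)
  else (c, m, s, b)

def parse_location_tree (location_tree : List (List (String × String))) : List (String × String) :=
  let p := location_tree.foldl pvStepA ("", "", "", "")
  let b := if p.2.2.2 = "" ∧ location_tree ≠ [] then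
             pvGetOr ((location_tree.getLast?).getD []) "name"
           else p.2.2.2
  [("city", p.1), ("community", p.2.1), ("subcommunity", p.2.2.1), ("building", b)]

-- ===== PORT B =====
-- Source B's first(pred): name of the first node whose uppercased type satisfies pred and whose name is non-empty
def pvFirst (pred : String → Bool) : List (List (String × String)) → String
  | [] => ""
  | n :: rest =>
    let name := pvGetOr n "name"
    if pred (PySem.Str.upper (pvGetOr n "type")) ∧ name ≠ "" then name
    else pvFirst pred rest

def parse_location_tree_alt (location_tree : List (List (String × String))) : List (String × String) :=
  let building0 := pvFirst (fun t => t ∈ ["TOWER", "BUILDING", "COMPOUND", "VILLA"]) location_tree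
  let building := if building0 = "" ∧ location_tree ≠ [] then
                    pvGetOr ((location_tree.getLast?).getD []) "name"
                  else building0
  [("city", pvFirst (fun t => t = "CITY") location_tree),
   ("community", pvFirst (fun t => t = "COMMUNITY") location_tree),
   ("subcommunity", pvFirst (fun t => t = "SUBCOMMUNITY") location_tree),
   ("building", building)]

-- ===== PRECONDITION & SPEC =====
def Spec_parse_location_tree (location_tree : List (List (String × String))) (out : List (String × String)) : Prop := out = parse_location_tree_alt location_tree
instance (location_tree : List (List (String × String))) (out : List (String × String)) : Decidable (Spec_parse_location_tree location_tree out) := by unfold Spec_parse_location_tree; infer_instance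

-- ===== CLAIM (what is proved, stated in full; the proofs are below) =====
def Claim_equal_parse_location_tree : Prop := ∀ (location_tree : List (List (String × String))), Dom_parse_location_tree location_tree → Spec_parse_location_tree location_tree (parse_location_tree location_tree)

-- ===== LEMMAS AND PROOFS =====

-- "x if x is non-empty, else y": how A's slots relate to B's scans
def pvOrElse (x y : String) : String := if x = "" then y else x

lemma foldlA_char (lt : List (List (String × String))) :
    ∀ c m s b, lt.foldl pvStepA (c, m, s, b) =
      (pvOrElse c (pvFirst (fun t => t = "CITY") lt),
       pvOrElse m (pvFirst (fun t => t = "COMMUNITY") lt),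
       pvOrElse s (pvFirst (fun t => t = "SUBCOMMUNITY") lt),
       pvOrElse b (pvFirst (fun t => t ∈ ["TOWER", "BUILDING", "COMPOUND", "VILLA"]) lt)) := by
  induction lt with
  | nil => intro c m s b; simp [pvFirst, pvOrElse]
  | cons n rest ih =>
    intro c m s b
    simp only [List.foldl_cons, pvStepA]
    set t := PySem.Str.upper (pvGetOr n "type") with ht
    set name := pvGetOr n "name" with hname
    by_cases h1 : t = "CITY" ∧ c = ""
    · simp only [if_pos h1, ih]
      simp [pvFirst, pvOrElse, ← ht, ← hname, h1.1, h1.2]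
    · simp only [if_neg h1]
      by_cases h2 : t = "COMMUNITY" ∧ m = ""
      · simp only [if_pos h2, ih]
        simp [pvFirst, pvOrElse, ← ht, ← hname, h2.1, h2.2]
      · simp only [if_neg h2]
        by_cases h3 : t = "SUBCOMMUNITY" ∧ s = ""
        · simp only [if_pos h3, ih]
          simp [pvFirst, pvOrElse, ← ht, ← hname, h3.1, h3.2]
        · simp only [if_neg h3]
          by_cases h4 : (t = "TOWER" ∨ t = "BUILDING" ∨ t = "COMPOUND" ∨ t = "VILLA") ∧ b = ""
          · simp only [if_pos h4, ih]
            rcases h4 with ⟨h4t, h4b⟩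
            have hb1 : t ≠ "CITY" := by rcases h4t with h|h|h|h <;> simp [h]
            have hb2 : t ≠ "COMMUNITY" := by rcases h4t with h|h|h|h <;> simp [h]
            have hb3 : t ≠ "SUBCOMMUNITY" := by rcases h4t with h|h|h|h <;> simp [h]
            simp [pvFirst, pvOrElse, ← ht, ← hname, hb1, hb2, hb3, h4t, h4b]
          · simp only [if_neg h4, ih]
            congr 1
            · -- city component
              by_cases hc : t = "CITY"
              · have : c ≠ "" := fun hcc => h1 ⟨hc, hcc⟩
                simp [pvOrElse, this]
              · simp [pvFirst, ← ht, hc]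
            congr 1
            · by_cases hc : t = "COMMUNITY"
              · have : m ≠ "" := fun hcc => h2 ⟨hc, hcc⟩
                simp [pvOrElse, this]
              · simp [pvFirst, ← ht, hc]
            congr 1
            · by_cases hc : t = "SUBCOMMUNITY"
              · have : s ≠ "" := fun hcc => h3 ⟨hc, hcc⟩
                simp [pvOrElse, this]
              · simp [pvFirst, ← ht, hc]
            · by_cases hc : t = "TOWER" ∨ t = "BUILDING" ∨ t = "COMPOUND" ∨ t = "VILLA"
              · have : b ≠ "" := fun hcc => h4 ⟨hc, hcc⟩
                simp [pvOrElse, this]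
              · simp [pvFirst, ← ht, hc]

-- ===== VERDICT (by name: the statement is the Claim_ definition above) =====
theorem parse_location_tree_spec : Claim_equal_parse_location_tree := by
  intro lt _
  unfold Spec_parse_location_tree parse_location_tree parse_location_tree_alt
  simp [foldlA_char lt "" "" "" "", pvOrElse]
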